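-- pv_equiv track=rewrite | github.com/HunterLarco/interview-questions | python/hackerrank/search/triple_sum.py | triplets
-- ===== SOURCE A (Python) =====
-- def triplets(a, b, c):
--   a = sorted(set(a))
--   b = sorted(set(b))
--   c = sorted(set(c))
--
--   before = 0
--   after = 0
--
--   count = 0
--   for q in b:
--     while before < len(a) and a[before] <= q:
--       before += 1
--     while after < len(c) and c[after] <= q:
--       after += 1
--     count += before * after
--   return count
-- ===== SOURCE B (Python) =====
-- def _le_count(xs, q):
--     # number of elements of sorted list xs that are <= q, by binary search
--     lo, hi = 0, len(xs)
--     while lo < hi: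
--         mid = (lo + hi) // 2
--         if xs[mid] <= q:
--             lo = mid + 1
--         else:
--             hi = mid
--     return lo
--
--
-- def triplets(a, b, c):
--     a = sorted(set(a))
--     c = sorted(set(c))
--     return sum(_le_count(a, q) * _le_count(c, q) for q in sorted(set(b)))
-- ===== Notes on version B (the rewrite author's own statement) =====
-- stated objective: alternative
-- what changed: The stateful two-pointer sweep over sorted b (monotone 'before'/'after' cursors into a and c) is replaced by an independent hand-written binary search (bisect_right) into sorted a and sorted c for each distinct q, summed with a generator.
import Mathlib
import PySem

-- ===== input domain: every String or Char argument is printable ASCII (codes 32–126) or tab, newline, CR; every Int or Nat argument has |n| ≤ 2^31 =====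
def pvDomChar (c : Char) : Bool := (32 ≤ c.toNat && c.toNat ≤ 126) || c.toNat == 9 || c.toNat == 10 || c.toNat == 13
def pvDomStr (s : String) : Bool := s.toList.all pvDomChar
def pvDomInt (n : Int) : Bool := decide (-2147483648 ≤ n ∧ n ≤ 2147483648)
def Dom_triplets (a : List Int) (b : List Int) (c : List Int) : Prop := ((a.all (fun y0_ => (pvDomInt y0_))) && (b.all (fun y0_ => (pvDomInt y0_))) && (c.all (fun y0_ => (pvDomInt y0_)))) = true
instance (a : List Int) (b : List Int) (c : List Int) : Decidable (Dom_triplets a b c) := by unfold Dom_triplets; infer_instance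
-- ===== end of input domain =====

-- B replaces A's stateful two-pointer sweep over sorted b with an independent
-- binary search (hand-written bisect_right) into sorted a and sorted c per q (alternative, same cost).


-- ===== PORT A =====
-- 'while before < len(a) and a[before] <= q: before += 1' — xs[before] is in range by the loop guard, so getElem is exact
def pvAdvance (xs : List Int) (q : Int) (i : Nat) : Nat :=
  if h : i < xs.length then
    if xs[i] ≤ q then pvAdvance xs q (i + 1) else i
  else i
termination_by xs.length - i
decreasing_by omega

def triplets (a : List Int) (b : List Int) (c : List Int) : Int :=
  let a' := PySem.List.sorted (PySem.Set.ofList a) (fun x => x)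
  let b' := PySem.List.sorted (PySem.Set.ofList b) (fun x => x)
  let c' := PySem.List.sorted (PySem.Set.ofList c) (fun x => x)
  let st := b'.foldl (fun (s : Nat × Nat × Int) q =>
      let before := pvAdvance a' q s.1
      let after := pvAdvance c' q s.2.1
      (before, after, s.2.2 + (before : Int) * (after : Int))) (0, 0, 0)
  st.2.2

-- ===== PORT B =====
-- _le_count: hand-written bisect_right loop; xs[mid] is in range since lo ≤ mid < hi ≤ len(xs), so getD is exact
def leCount (xs : List Int) (q : Int) (lo hi : Nat) : Nat :=
  if h : lo < hi then
    let mid := (lo + hi) / 2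
    if xs.getD mid 0 ≤ q then leCount xs q (mid + 1) hi else leCount xs q lo mid
  else lo
termination_by hi - lo
decreasing_by all_goals omega

def triplets_alt (a : List Int) (b : List Int) (c : List Int) : Int :=
  let a' := PySem.List.sorted (PySem.Set.ofList a) (fun x => x)
  let c' := PySem.List.sorted (PySem.Set.ofList c) (fun x => x)
  (PySem.List.sorted (PySem.Set.ofList b) (fun x => x)).foldl
    (fun cnt q => cnt + (leCount a' q 0 a'.length : Int) * (leCount c' q 0 c'.length : Int)) 0

-- ===== PRECONDITION & SPEC =====
def Spec_triplets (a : List Int) (b : List Int) (c : List Int) (out : Int) : Prop := out = triplets_alt a b c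
instance (a : List Int) (b : List Int) (c : List Int) (out : Int) : Decidable (Spec_triplets a b c out) := by unfold Spec_triplets; infer_instance

-- ===== CLAIM (what is proved, stated in full; the proofs are below) =====
def Claim_equal_triplets : Prop := ∀ (a : List Int) (b : List Int) (c : List Int), Dom_triplets a b c → Spec_triplets a b c (triplets a b c)

-- ===== LEMMAS AND PROOFS =====

-- number of elements ≤ q
def pvCnt (xs : List Int) (q : Int) : Nat := xs.countP (fun x => decide (x ≤ q))

theorem pvCnt_le_length (xs : List Int) (q : Int) : pvCnt xs q ≤ xs.length :=
  List.countP_le_length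

theorem pvCnt_mono (xs : List Int) {p q : Int} (h : p ≤ q) : pvCnt xs p ≤ pvCnt xs q := by
  apply List.countP_mono_left
  intro x _ hx
  simp at hx ⊢; omega

-- on a sorted list, xs[j] ≤ q exactly for the first pvCnt indices
theorem sorted_index_iff (xs : List Int) (q : Int) (hs : xs.Pairwise (· ≤ ·)) :
    ∀ (j : Nat) (hj : j < xs.length), (xs[j] ≤ q ↔ j < pvCnt xs q) := by
  induction xs with
  | nil => intro j hj; simp at hj
  | cons x t ih =>
    rw [List.pairwise_cons] at hs
    intro j hj
    by_cases hx : x ≤ q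
    · have : pvCnt (x :: t) q = pvCnt t q + 1 := by
        simp [pvCnt, hx]
      rw [this]
      cases j with
      | zero => simpa using hx
      | succ m =>
        simp only [List.getElem_cons_succ]
        have := ih hs.2 m (by simpa using hj)
        omega
    · have hall : pvCnt (x :: t) q = 0 := by
        apply List.countP_eq_zero.mpr
        intro y hy
        rcases List.mem_cons.mp hy with h | h
        · subst h; simpa using hx
        · have := hs.1 y h; simp; omega
      rw [hall]
      cases j with
      | zero => simpa using hx
      | succ m =>
        have hm : m < t.length := by simpa using hj
        simp only [List.getElem_cons_succ]
        have hxm := hs.1 (t[m]'hm) (List.getElem_mem _)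
        constructor
        · intro h; omega
        · omega

-- A's while loop reaches pvCnt when started at or below it
theorem pvAdvance_eq (xs : List Int) (q : Int) (hs : xs.Pairwise (· ≤ ·)) :
    ∀ (i : Nat), i ≤ pvCnt xs q → pvAdvance xs q i = pvCnt xs q := by
  intro i hi
  fun_induction pvAdvance xs q i with
  | case1 i h hle ih =>
    apply ih
    have := (sorted_index_iff xs q hs i h).mp hle
    omega
  | case2 i h hle =>
    have hll := pvCnt_le_length xs q
    by_contra hne
    have hlt : i < pvCnt xs q := by omega
    have := (sorted_index_iff xs q hs i h).mpr hlt
    omega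
  | case3 i h =>
    have := pvCnt_le_length xs q
    omega

-- B's binary search computes pvCnt
theorem leCount_eq (xs : List Int) (q : Int) (hs : xs.Pairwise (· ≤ ·)) :
    ∀ (lo hi : Nat), hi ≤ xs.length → lo ≤ pvCnt xs q → pvCnt xs q ≤ hi →
    leCount xs q lo hi = pvCnt xs q := by
  intro lo hi
  fun_induction leCount xs q lo hi with
  | case1 lo hi h mid hmid ih =>
    intro hhi hlo hqhi
    have hmlt : mid < xs.length := by simp only [mid]; omega
    rw [List.getD_eq_getElem _ _ hmlt] at hmid
    have := (sorted_index_iff xs q hs mid hmlt).mp hmid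
    exact ih hhi (by omega) hqhi
  | case2 lo hi h mid hmid ih =>
    intro hhi hlo hqhi
    have hmlt : mid < xs.length := by simp only [mid]; omega
    rw [List.getD_eq_getElem _ _ hmlt] at hmid
    apply ih (by omega) hlo
    by_contra hc
    have hmc : mid < pvCnt xs q := by omega
    have := (sorted_index_iff xs q hs mid hmlt).mpr hmc
    omega
  | case3 lo hi h =>
    intro _ hlo hqhi
    omega

theorem leCount_full (xs : List Int) (q : Int) (hs : xs.Pairwise (· ≤ ·)) :
    leCount xs q 0 xs.length = pvCnt xs q :=
  leCount_eq xs q hs 0 xs.length le_rfl (Nat.zero_le _) (pvCnt_le_length xs q)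

-- the fold over sorted b: the two-pointer state equals the count as long as it starts at or below it
theorem fold_eq (A C : List Int) (hA : A.Pairwise (· ≤ ·)) (hC : C.Pairwise (· ≤ ·)) :
    ∀ (L : List Int), L.Pairwise (· ≤ ·) →
    ∀ (bf af : Nat) (cnt : Int),
      (∀ q ∈ L, bf ≤ pvCnt A q ∧ af ≤ pvCnt C q) →
      (L.foldl (fun (s : Nat × Nat × Int) q =>
          let before := pvAdvance A q s.1
          let after := pvAdvance C q s.2.1
          (before, after, s.2.2 + (before : Int) * (after : Int))) (bf, af, cnt)).2.2
      = L.foldl (fun c q => c + (leCount A q 0 A.length : Int) * (leCount C q 0 C.length : Int)) cnt := by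
  intro L
  induction L with
  | nil => intro _ bf af cnt _; rfl
  | cons q L ih =>
    intro hL bf af cnt hst
    rw [List.pairwise_cons] at hL
    have hq := hst q (List.mem_cons_self)
    have hbf : pvAdvance A q bf = pvCnt A q := pvAdvance_eq A q hA bf hq.1
    have haf : pvAdvance C q af = pvCnt C q := pvAdvance_eq C q hC af hq.2
    simp only [List.foldl_cons]
    rw [ih hL.2 _ _ _ ?_]
    · rw [hbf, haf, leCount_full A q hA, leCount_full C q hC]
    · intro r hr
      have hqr := hL.1 r hr
      rw [hbf, haf]
      exact ⟨pvCnt_mono A hqr, pvCnt_mono C hqr⟩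

theorem sorted_set_pairwise_le (xs : List Int) :
    (PySem.List.sorted (PySem.Set.ofList xs) (fun x => x)).Pairwise (· ≤ ·) :=
  (PySem.List.sorted_ofList_pairwise_lt xs).imp (fun h => le_of_lt h)

-- ===== VERDICT (by name: the statement is the Claim_ definition above) =====
theorem triplets_spec : Claim_equal_triplets := by
  intro a b c _
  unfold Spec_triplets triplets triplets_alt
  have hA := sorted_set_pairwise_le a
  have hB := sorted_set_pairwise_le b
  have hC := sorted_set_pairwise_le c
  exact fold_eq _ _ hA hC _ hB 0 0 0 (fun q _ => ⟨Nat.zero_le _, Nat.zero_le _⟩)
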